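-- pv_equiv track=rewrite | github.com/TwinAnalytics/player-score | src/processing.py | main_pos_from_string
-- ===== SOURCE A (Python) =====
-- def main_pos_from_string(pos: str) -> str | None:
--     """
--     Leitet eine Hauptposition aus einem FBref-Positionsstring ab, z.B.:
--     - "FW, MF" -> FW
--     - "MF, FW" -> MF
--     - "DF,MF"  -> DF (oder MF, je nach Reihenfolge)
--
--     Logik:
--     1) Erster Positions-Teil hat Vorrang.
--     2) Falls dort nichts erkannt wird, wird über alle Teile mit einer Prioritätsliste gesucht.
--     """
--
--     if pos is None:
--         return None
--
--     # Positionsteile splitten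
--     parts = [p.strip() for p in str(pos).split(",") if p.strip()]
--     if not parts:
--         return None
--
--     # Codes, die wir erkennen wollen
--     primary_codes = ["FW", "AM", "MF", "DF", "GK"]
--
--     first_part = parts[0]
--
--     # 1) Zuerst den ERSTEN Teil respektieren
--     for code in primary_codes:
--         if code in first_part:
--             return code
--
--     # 2) Fallback: über alle Teile mit einer Priorität suchen
--     #    (hier kannst du die Reihenfolge festlegen, z.B. MF vor FW
--     #     oder FW vor MF – aber das greift nur, wenn der erste Teil nichts enthält)
--     priority = ["FW", "AM", "MF", "DF", "GK"]
--
--     for code in priority: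
--         if any(code in part for part in parts):
--             return code
--
--     # 3) Letzter Fallback: erster Teil roh zurückgeben
--     return first_part
-- ===== SOURCE B (Python) =====
-- CODES = ["FW", "AM", "MF", "DF", "GK"]
-- RANK = {(c[0], c[1]): i for i, c in enumerate(CODES)}
--
--
-- def _best_rank(part):
--     # minimal priority rank of any recognized 2-char code occurring in part,
--     # found by sliding a 2-char window and looking the pair up in RANK
--     r = None
--     for pair in zip(part, part[1:]):
--         k = RANK.get(pair)
--         if k is not None and (r is None or k < r):
--             r = k
--     return r
--
--
-- def main_pos_from_string(pos: str) -> str | None: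
--     # B: every code is exactly 2 chars, so "code in part" = some adjacent char
--     # pair equals it; slide a window over each part, look the pair up in a
--     # rank dict and keep the minimal rank (first part first, then all parts).
--     if pos is None:
--         return None
--     parts = [p.strip() for p in str(pos).split(",") if p.strip()]
--     if not parts:
--         return None
--     r = _best_rank(parts[0])
--     if r is None:
--         for p in parts:
--             k = _best_rank(p)
--             if k is not None and (r is None or k < r):
--                 r = k
--     return CODES[r] if r is not None else parts[0]
-- ===== Notes on version B (the rewrite author's own statement) =====
-- stated objective: alternative
-- what changed: All five codes are exactly 2 characters, so B drops substring searching entirely: it slides a 2-character window over each part, looks each adjacent character pair up in a pair-to-rank dictionary, and keeps a running minimum rank (first over the first part, then over all parts), finally mapping the minimal rank back to its code; A instead scans the codes in priority order with repeated substring-membership tests and any() passes.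
import Mathlib
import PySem

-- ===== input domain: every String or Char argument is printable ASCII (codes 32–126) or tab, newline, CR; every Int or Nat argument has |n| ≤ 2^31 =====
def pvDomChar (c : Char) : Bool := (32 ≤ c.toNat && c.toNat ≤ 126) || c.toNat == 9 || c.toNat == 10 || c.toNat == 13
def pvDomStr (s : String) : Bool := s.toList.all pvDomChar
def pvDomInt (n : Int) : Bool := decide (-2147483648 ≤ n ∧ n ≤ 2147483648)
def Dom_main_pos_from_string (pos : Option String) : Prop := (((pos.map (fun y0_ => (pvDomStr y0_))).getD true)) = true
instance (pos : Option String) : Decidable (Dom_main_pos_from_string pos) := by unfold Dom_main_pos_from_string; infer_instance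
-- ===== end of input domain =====

-- B replaces repeated substring scans in priority order by a sliding 2-char-window pass with a pair→rank dictionary and a min-rank accumulator (alternative algorithm, same cost).


-- ===== PORT A =====
def main_pos_from_string (pos : Option String) : Option String :=
  match pos with
  | none => none
  | some s =>
    -- parts = [p.strip() for p in str(pos).split(",") if p.strip()]
    let parts := (((PySem.Str.split? s ",").getD []).map PySem.Str.strip).filter (fun p => p ≠ "")
    match parts with
    | [] => none
    | first_part :: _ =>
      let primary_codes := ["FW", "AM", "MF", "DF", "GK"]
      -- 1) first loop: first code contained in first_part
      match primary_codes.find? (fun code => PySem.Str.isIn code first_part) with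
      | some code => some code
      | none =>
        let priority := ["FW", "AM", "MF", "DF", "GK"]
        -- 2) fallback: first code (code-major) contained in any part
        match priority.find? (fun code => parts.any (fun part => PySem.Str.isIn code part)) with
        | some code => some code
        | none => some first_part

-- ===== PORT B =====
-- CODES = ["FW", "AM", "MF", "DF", "GK"]
def pvCodes : List String := ["FW", "AM", "MF", "DF", "GK"]
-- RANK = {(c[0], c[1]): i for i, c in enumerate(CODES)}  (written out as the literal pairs)
def pvRank : PySem.Dict (Char × Char) Nat :=
  PySem.Dict.ofList [(('F','W'), 0), (('A','M'), 1), (('M','F'), 2), (('D','F'), 3), (('G','K'), 4)]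

-- loop body 'if k is not None and (r is None or k < r): r = k', named so both loops share it
def pvMinUpd (r : Option Nat) (k? : Option Nat) : Option Nat :=
  match k? with
  | none => r
  | some k =>
    match r with
    | none => some k
    | some r' => if k < r' then some k else some r'

-- _best_rank: slide a 2-char window (zip(part, part[1:])) and keep the minimal rank found
def pvBestRank (part : String) : Option Nat :=
  (part.toList.zip part.toList.tail).foldl
    (fun r pair => pvMinUpd r (PySem.Dict.get? pvRank pair)) none

def main_pos_from_string_alt (pos : Option String) : Option String :=
  match pos with
  | none => none
  | some s =>
    let parts := (((PySem.Str.split? s ",").getD []).map PySem.Str.strip).filter (fun p => p ≠ "")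
    match parts with
    | [] => none
    | first :: rest =>
      let r :=
        match pvBestRank first with
        | some k => some k
        | none => (first :: rest).foldl (fun r p => pvMinUpd r (pvBestRank p)) none
      match r with
      -- CODES[r]: ranks come from RANK so k < 5 and Python's indexing never raises; exact here
      | some k => some (PySem.List.pyGetD pvCodes (k : Int) "")
      | none => some first

-- ===== PRECONDITION & SPEC =====
def Spec_main_pos_from_string (pos : Option String) (out : Option String) : Prop := out = main_pos_from_string_alt pos
instance (pos : Option String) (out : Option String) : Decidable (Spec_main_pos_from_string pos out) := by unfold Spec_main_pos_from_string; infer_instance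

-- ===== CLAIM (what is proved, stated in full; the proofs are below) =====
def Claim_equal_main_pos_from_string : Prop := ∀ (pos : Option String), Dom_main_pos_from_string pos → Spec_main_pos_from_string pos (main_pos_from_string pos)

-- ===== LEMMAS AND PROOFS =====

-- option-min combinator: what pvMinUpd computes
def pvOm (a b : Option Nat) : Option Nat :=
  match a, b with
  | none, b => b
  | some x, none => some x
  | some x, some y => some (min x y)

-- minimal rank of a code pair occurring adjacently in l, as an if-chain
def pvPrioL (l : List Char) : Option Nat :=
  if ('F','W') ∈ l.zip l.tail then some 0
  else if ('A','M') ∈ l.zip l.tail then some 1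
  else if ('M','F') ∈ l.zip l.tail then some 2
  else if ('D','F') ∈ l.zip l.tail then some 3
  else if ('G','K') ∈ l.zip l.tail then some 4
  else none

-- minimal rank of a code pair occurring in any part
def pvPrioAny (ps : List String) : Option Nat :=
  if ps.any (fun p => decide (('F','W') ∈ p.toList.zip p.toList.tail)) then some 0
  else if ps.any (fun p => decide (('A','M') ∈ p.toList.zip p.toList.tail)) then some 1
  else if ps.any (fun p => decide (('M','F') ∈ p.toList.zip p.toList.tail)) then some 2
  else if ps.any (fun p => decide (('D','F') ∈ p.toList.zip p.toList.tail)) then some 3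
  else if ps.any (fun p => decide (('G','K') ∈ p.toList.zip p.toList.tail)) then some 4
  else none

lemma pvOm_none_right (a : Option Nat) : pvOm a none = a := by cases a <;> rfl

lemma pvOm_assoc (a b c : Option Nat) : pvOm (pvOm a b) c = pvOm a (pvOm b c) := by
  cases a <;> cases b <;> cases c <;> simp [pvOm, min_assoc]

lemma pvMinUpd_eq (r k? : Option Nat) : pvMinUpd r k? = pvOm r k? := by
  cases k? with
  | none => exact (pvOm_none_right r).symm
  | some k =>
    cases r with
    | none => rfl
    | some r' =>
      simp only [pvMinUpd, pvOm]
      split_ifs with h <;> congr 1 <;> omega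

lemma pvRank_get?_none (p : Char × Char) (h1 : p ≠ ('F','W')) (h2 : p ≠ ('A','M'))
    (h3 : p ≠ ('M','F')) (h4 : p ≠ ('D','F')) (h5 : p ≠ ('G','K')) :
    PySem.Dict.get? pvRank p = none := by
  have hd : pvRank = ((((PySem.Dict.empty.insert ('F','W') 0).insert ('A','M') 1).insert
      ('M','F') 2).insert ('D','F') 3).insert ('G','K') 4 := by decide
  rw [hd]
  simp [PySem.Dict.get?_insert, h1, h2, h3, h4, h5]

-- a 2-char substring is exactly an adjacent pair
lemma infix_pair_iff_mem_zip (x y : Char) (s : List Char) :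
    ([x, y] <:+: s) ↔ (x, y) ∈ s.zip s.tail := by
  induction s with
  | nil => simp
  | cons a t ih =>
    cases t with
    | nil =>
      simp only [List.tail_cons, List.zip_nil_right, List.not_mem_nil, iff_false]
      intro hinf
      have := hinf.length_le
      simp at this
    | cons b u =>
      rw [List.infix_cons_iff]
      constructor
      · rintro (hpre | hinf)
        · rw [List.cons_prefix_cons] at hpre
          obtain ⟨rfl, hpre⟩ := hpre
          rw [List.cons_prefix_cons] at hpre
          obtain ⟨rfl, _⟩ := hpre
          simp
        · simp only [List.tail_cons, List.zip_cons_cons, List.mem_cons]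
          exact Or.inr (ih.mp hinf)
      · simp only [List.tail_cons, List.zip_cons_cons, List.mem_cons]
        rintro (hp | hm)
        · rw [Prod.mk.injEq] at hp
          obtain ⟨rfl, rfl⟩ := hp
          exact Or.inl (by simp [List.cons_prefix_cons])
        · exact Or.inr (ih.mpr hm)

lemma isIn_pair_eq (c : String) (x y : Char) (hc : c.toList = [x, y]) (t : String) :
    PySem.Str.isIn c t = decide ((x, y) ∈ t.toList.zip t.toList.tail) := by
  rw [Bool.eq_iff_iff, PySem.Str.isIn_iff_infix, hc, decide_eq_true_eq]
  exact infix_pair_iff_mem_zip x y t.toList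

lemma pvOm_get_prioL (a b : Char) (u : List Char) :
    pvOm (PySem.Dict.get? pvRank (a, b)) (pvPrioL (b :: u)) = pvPrioL (a :: b :: u) := by
  by_cases h1 : (a, b) = ('F','W')
  · rw [Prod.mk.injEq] at h1; obtain ⟨rfl, rfl⟩ := h1
    rw [show PySem.Dict.get? pvRank ('F','W') = some 0 from by decide]
    simp only [pvPrioL, List.tail_cons, List.zip_cons_cons, List.mem_cons]
    simp
    split_ifs <;> simp [pvOm]
  by_cases h2 : (a, b) = ('A','M')
  · rw [Prod.mk.injEq] at h2; obtain ⟨rfl, rfl⟩ := h2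
    rw [show PySem.Dict.get? pvRank ('A','M') = some 1 from by decide]
    simp only [pvPrioL, List.tail_cons, List.zip_cons_cons, List.mem_cons]
    simp
    split_ifs <;> simp [pvOm]
  by_cases h3 : (a, b) = ('M','F')
  · rw [Prod.mk.injEq] at h3; obtain ⟨rfl, rfl⟩ := h3
    rw [show PySem.Dict.get? pvRank ('M','F') = some 2 from by decide]
    simp only [pvPrioL, List.tail_cons, List.zip_cons_cons, List.mem_cons]
    simp
    split_ifs <;> simp [pvOm]
  by_cases h4 : (a, b) = ('D','F')
  · rw [Prod.mk.injEq] at h4; obtain ⟨rfl, rfl⟩ := h4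
    rw [show PySem.Dict.get? pvRank ('D','F') = some 3 from by decide]
    simp only [pvPrioL, List.tail_cons, List.zip_cons_cons, List.mem_cons]
    simp
    split_ifs <;> simp [pvOm]
  by_cases h5 : (a, b) = ('G','K')
  · rw [Prod.mk.injEq] at h5; obtain ⟨rfl, rfl⟩ := h5
    rw [show PySem.Dict.get? pvRank ('G','K') = some 4 from by decide]
    simp only [pvPrioL, List.tail_cons, List.zip_cons_cons, List.mem_cons]
    simp
    split_ifs <;> simp [pvOm]
  · rw [pvRank_get?_none _ h1 h2 h3 h4 h5]
    simp only [pvPrioL, List.tail_cons, List.zip_cons_cons, List.mem_cons,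
      Ne.symm h1, Ne.symm h2, Ne.symm h3, Ne.symm h4, Ne.symm h5]
    simp [pvOm]
    rfl

lemma pvBestRank_aux (l : List Char) : ∀ (r : Option Nat),
    (l.zip l.tail).foldl (fun r pair => pvMinUpd r (PySem.Dict.get? pvRank pair)) r
      = pvOm r (pvPrioL l) := by
  induction l with
  | nil => intro r; simp [pvPrioL, pvOm_none_right]
  | cons a t ih =>
    intro r
    cases t with
    | nil => simp [pvPrioL, pvOm_none_right]
    | cons b u =>
      simp only [List.tail_cons, List.zip_cons_cons, List.foldl_cons]
      have ih' := ih
      simp only [List.tail_cons] at ih'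
      rw [ih', pvMinUpd_eq, pvOm_assoc, pvOm_get_prioL]

lemma pvBestRank_eq (s : String) : pvBestRank s = pvPrioL s.toList := by
  unfold pvBestRank
  rw [pvBestRank_aux]
  rfl

set_option maxHeartbeats 1000000 in
lemma pvOm_prioL_prioAny (p : String) (ps : List String) :
    pvOm (pvPrioL p.toList) (pvPrioAny ps) = pvPrioAny (p :: ps) := by
  by_cases h1 : ('F','W') ∈ p.toList.zip p.toList.tail <;>
  by_cases h2 : ('A','M') ∈ p.toList.zip p.toList.tail <;>
  by_cases h3 : ('M','F') ∈ p.toList.zip p.toList.tail <;>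
  by_cases h4 : ('D','F') ∈ p.toList.zip p.toList.tail <;>
  by_cases h5 : ('G','K') ∈ p.toList.zip p.toList.tail <;>
    (simp only [pvPrioL, pvPrioAny, List.any_cons, h1, h2, h3, h4, h5, decide_true,
       decide_false, Bool.true_or, Bool.false_or] <;>
     split_ifs <;> simp_all [pvOm])

lemma pvFoldParts (ps : List String) : ∀ (r : Option Nat),
    ps.foldl (fun r p => pvMinUpd r (pvBestRank p)) r = pvOm r (pvPrioAny ps) := by
  induction ps with
  | nil => intro r; simp [pvPrioAny, pvOm_none_right]
  | cons p t ih =>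
    intro r
    simp only [List.foldl_cons]
    rw [ih, pvMinUpd_eq, pvBestRank_eq, pvOm_assoc, pvOm_prioL_prioAny]

-- ===== VERDICT (by name: the statement is the Claim_ definition above) =====
set_option maxHeartbeats 1000000 in
theorem main_pos_from_string_spec : Claim_equal_main_pos_from_string := by
  intro pos _
  unfold Spec_main_pos_from_string main_pos_from_string main_pos_from_string_alt
  cases pos with
  | none => rfl
  | some s =>
    simp only
    cases hp : (((PySem.Str.split? s ",").getD []).map PySem.Str.strip).filter (fun p => p ≠ "") with
    | nil => rfl
    | cons first rest =>
      simp only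
      rw [pvBestRank_eq, pvFoldParts]
      have eFW := isIn_pair_eq "FW" 'F' 'W' (by decide)
      have eAM := isIn_pair_eq "AM" 'A' 'M' (by decide)
      have eMF := isIn_pair_eq "MF" 'M' 'F' (by decide)
      have eDF := isIn_pair_eq "DF" 'D' 'F' (by decide)
      have eGK := isIn_pair_eq "GK" 'G' 'K' (by decide)
      simp only [List.find?_cons, List.find?_nil, eFW, eAM, eMF, eDF, eGK]
      by_cases h1 : ('F','W') ∈ first.toList.zip first.toList.tail
      · simp [List.find?, pvPrioL, h1]
        decide
      by_cases h2 : ('A','M') ∈ first.toList.zip first.toList.tail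
      · simp [List.find?, pvPrioL, h1, h2]
        decide
      by_cases h3 : ('M','F') ∈ first.toList.zip first.toList.tail
      · simp [List.find?, pvPrioL, h1, h2, h3]
        decide
      by_cases h4 : ('D','F') ∈ first.toList.zip first.toList.tail
      · simp [List.find?, pvPrioL, h1, h2, h3, h4]
        decide
      by_cases h5 : ('G','K') ∈ first.toList.zip first.toList.tail
      · simp [List.find?, pvPrioL, h1, h2, h3, h4, h5]
        decide
      -- first part contains no code: both fall back to the priority search over all parts
      by_cases g1 : rest.any (fun p => decide (('F','W') ∈ p.toList.zip p.toList.tail)) = true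
      · simp [List.find?, pvPrioL, pvPrioAny, pvOm, List.any_cons, h1, h2, h3, h4, h5, g1]
        decide
      by_cases g2 : rest.any (fun p => decide (('A','M') ∈ p.toList.zip p.toList.tail)) = true
      · simp [List.find?, pvPrioL, pvPrioAny, pvOm, List.any_cons, h1, h2, h3, h4, h5, g1, g2]
        decide
      by_cases g3 : rest.any (fun p => decide (('M','F') ∈ p.toList.zip p.toList.tail)) = true
      · simp [List.find?, pvPrioL, pvPrioAny, pvOm, List.any_cons, h1, h2, h3, h4, h5, g1, g2, g3]
        decide
      by_cases g4 : rest.any (fun p => decide (('D','F') ∈ p.toList.zip p.toList.tail)) = true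
      · simp [List.find?, pvPrioL, pvPrioAny, pvOm, List.any_cons, h1, h2, h3, h4, h5, g1, g2, g3, g4]
        decide
      by_cases g5 : rest.any (fun p => decide (('G','K') ∈ p.toList.zip p.toList.tail)) = true
      · simp [List.find?, pvPrioL, pvPrioAny, pvOm, List.any_cons, h1, h2, h3, h4, h5, g1, g2, g3, g4, g5]
        decide
      · simp [List.find?, pvPrioL, pvPrioAny, pvOm, List.any_cons, h1, h2, h3, h4, h5, g1, g2, g3, g4, g5]
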